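-- pv_equiv track=rewrite | github.com/ghost9933/DSA | 1576-reorder-routes-to-make-all-paths-lead-to-the-city-zero/1576-reorder-routes-to-make-all-paths-lead-to-the-city-zero.py | minReorder
-- ===== SOURCE A (Python) =====
-- from typing import List
-- from collections import defaultdict, deque
--
-- def minReorder(n: int, connections: List[List[int]]) -> int:
--     graph = defaultdict(list)
--     # Build the graph
--     for u, v in connections:
--         graph[u].append((v, 1))  # Original direction
--         graph[v].append((u, 0))  # Reversed direction
--
--     # BFS to count the changes needed
--     queue = deque([0])
--     visited = set()
--     res = 0
--
--     while queue:
--         node = queue.popleft()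
--         visited.add(node)
--         for neighbor, cost in graph[node]:
--             if neighbor not in visited:
--                 res += cost  # Count the change if it's in the original direction
--                 queue.append(neighbor)
--
--     return res
-- ===== SOURCE B (Python) =====
-- from typing import List
--
-- def minReorder(n: int, connections: List[List[int]]) -> int:
--     # Index-free BFS: no adjacency dict is built; each popped node scans the
--     # raw edge list directly, counting original-direction edges to unvisited nodes.
--     visited = set()
--     queue = [0]
--     res = 0
--     i = 0
--     while i < len(queue):
--         node = queue[i]
--         i += 1
--         visited.add(node)
--         for edge in connections:
--             if edge[0] == node and edge[1] not in visited:
--                 res += 1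
--                 queue.append(edge[1])
--             if edge[1] == node and edge[0] not in visited:
--                 queue.append(edge[0])
--     return res
-- ===== Notes on version B (the rewrite author's own statement) =====
-- stated objective: simpler
-- what changed: B drops A's defaultdict adjacency-list construction and deque entirely: the BFS pops from a plain list and, for each popped node, scans the raw edge list directly (cost-1 for forward edges, cost-0 for reverse), so the graph-building pass and the (neighbor,cost) adjacency structure disappear.
import Mathlib
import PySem

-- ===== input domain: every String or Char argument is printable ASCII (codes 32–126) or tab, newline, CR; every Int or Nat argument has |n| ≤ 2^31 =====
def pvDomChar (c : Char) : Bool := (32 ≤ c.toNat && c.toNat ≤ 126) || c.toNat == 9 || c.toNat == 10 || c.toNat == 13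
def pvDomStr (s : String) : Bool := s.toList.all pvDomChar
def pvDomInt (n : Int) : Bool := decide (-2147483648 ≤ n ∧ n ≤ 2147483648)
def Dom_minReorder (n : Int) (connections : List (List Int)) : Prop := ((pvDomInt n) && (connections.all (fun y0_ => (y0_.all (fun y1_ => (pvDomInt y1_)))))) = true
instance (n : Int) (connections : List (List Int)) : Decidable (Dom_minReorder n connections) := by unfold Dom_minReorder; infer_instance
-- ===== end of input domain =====

-- B removes A's adjacency-dict building pass and scans the raw edge list per popped node; objective: simpler.

-- fuel bound for the BFS while-loops (totality guard only; large enough for every actual run)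
def pvFuel (connections : List (List Int)) : Nat :=
  (2 * connections.length + 2) ^ (2 * connections.length + 2)

-- ===== PORT A =====
def pvBuildGraph (connections : List (List Int)) : PySem.Dict Int (List (Int × Int)) :=
  connections.foldl (fun g row =>
    match row with
    | [u, v] =>
      let g1 := g.insert u (g.getD u [] ++ [(v, (1 : Int))])
      g1.insert v (g1.getD v [] ++ [(u, (0 : Int))])
    | _ => g) PySem.Dict.empty

def pvBfsA (graph : PySem.Dict Int (List (Int × Int))) : Nat → List Int → PySem.Set Int → Int → Int
  | 0, _, _, res => res
  | _ + 1, [], _, res => res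
  | fuel + 1, node :: rest, visited, res =>
    let visited' := PySem.Set.add visited node
    let s := (graph.getD node []).foldl
      (fun (s : List Int × Int) nc =>
        if PySem.Set.contains visited' nc.1 then s else (s.1 ++ [nc.1], s.2 + nc.2))
      (rest, res)
    pvBfsA graph fuel s.1 visited' s.2

def minReorder (n : Int) (connections : List (List Int)) : Int :=
  pvBfsA (pvBuildGraph connections) (pvFuel connections) [0] PySem.Set.empty 0

-- ===== PORT B =====
def pvBfsB (connections : List (List Int)) : Nat → List Int → PySem.Set Int → Int → Int
  | 0, _, _, res => res
  | _ + 1, [], _, res => res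
  | fuel + 1, node :: rest, visited, res =>
    let visited' := PySem.Set.add visited node
    let s := connections.foldl
      (fun (s : List Int × Int) edge =>
        match edge with
        | u :: v :: _ =>
          let s1 := if u == node && !(PySem.Set.contains visited' v) then (s.1 ++ [v], s.2 + 1) else s
          if v == node && !(PySem.Set.contains visited' u) then (s1.1 ++ [u], s1.2) else s1
        | _ => s)
      (rest, res)
    pvBfsB connections fuel s.1 visited' s.2

def minReorder_alt (n : Int) (connections : List (List Int)) : Int :=
  pvBfsB connections (pvFuel connections) [0] PySem.Set.empty 0

-- ===== PRECONDITION & SPEC =====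
-- A unpacks 'for u, v in connections' and raises ValueError on any row whose length is not 2.
def Pre_minReorder (n : Int) (connections : List (List Int)) : Prop :=
  ∀ row ∈ connections, row.length = 2
instance (n : Int) (connections : List (List Int)) : Decidable (Pre_minReorder n connections) := by unfold Pre_minReorder; infer_instance

def pvWitness_minReorder : Int × List (List Int) := (3, [[0, 1], [2, 0]])

def Spec_minReorder (n : Int) (connections : List (List Int)) (out : Int) : Prop := out = minReorder_alt n connections
instance (n : Int) (connections : List (List Int)) (out : Int) : Decidable (Spec_minReorder n connections out) := by unfold Spec_minReorder; infer_instance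

-- ===== CLAIM (what is proved, stated in full; the proofs are below) =====
def Claim_equal_minReorder : Prop := ∀ (n : Int) (connections : List (List Int)), Dom_minReorder n connections → Pre_minReorder n connections → Spec_minReorder n connections (minReorder n connections)

-- ===== LEMMAS AND PROOFS =====

-- the (neighbor, cost) adjacency entries of a node, read directly off the edge list
def pvEntries (node : Int) (connections : List (List Int)) : List (Int × Int) :=
  connections.flatMap (fun e =>
    match e with
    | u :: v :: _ =>
      (if u == node then [(v, (1 : Int))] else []) ++ (if v == node then [(u, (0 : Int))] else [])
    | _ => [])

theorem pvEntries_cons (node u v : Int) (w : List Int) (t : List (List Int)) :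
    pvEntries node ((u :: v :: w) :: t) =
      ((if u == node then [(v, (1 : Int))] else []) ++ (if v == node then [(u, (0 : Int))] else []))
        ++ pvEntries node t := by
  simp [pvEntries]

theorem pvStep_getD (g : PySem.Dict Int (List (Int × Int))) (u v node : Int) :
    ((g.insert u (g.getD u [] ++ [(v, (1 : Int))])).insert v
        (((g.insert u (g.getD u [] ++ [(v, (1 : Int))])).getD v []) ++ [(u, (0 : Int))])).getD node []
    = g.getD node [] ++
      ((if u == node then [(v, (1 : Int))] else []) ++ (if v == node then [(u, (0 : Int))] else [])) := by
  simp only [PySem.Dict.getD_insert, beq_iff_eq]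
  split_ifs <;> subst_vars <;> simp_all

theorem pvBuildGraph_getD (connections : List (List Int))
    (h : ∀ row ∈ connections, row.length = 2) (g : PySem.Dict Int (List (Int × Int))) (node : Int) :
    (connections.foldl (fun g row =>
      match row with
      | [u, v] =>
        let g1 := g.insert u (g.getD u [] ++ [(v, (1 : Int))])
        g1.insert v (g1.getD v [] ++ [(u, (0 : Int))])
      | _ => g) g).getD node [] = g.getD node [] ++ pvEntries node connections := by
  induction connections generalizing g with
  | nil => simp [pvEntries]
  | cons row t ih =>
    have hrow := h row (List.mem_cons_self)
    match row, hrow with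
    | [u, v], _ =>
      have ht : ∀ r ∈ t, r.length = 2 := fun r hr => h r (List.mem_cons_of_mem _ hr)
      rw [List.foldl_cons, ih ht, pvEntries_cons]
      rw [← List.append_assoc]
      congr 1
      exact pvStep_getD g u v node

theorem pvInner_eq (connections : List (List Int))
    (h : ∀ row ∈ connections, row.length = 2) (visited' : PySem.Set Int) (node : Int)
    (p : List Int × Int) :
    (pvEntries node connections).foldl
      (fun (s : List Int × Int) nc =>
        if PySem.Set.contains visited' nc.1 then s else (s.1 ++ [nc.1], s.2 + nc.2)) p
    = connections.foldl
      (fun (s : List Int × Int) edge =>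
        match edge with
        | u :: v :: _ =>
          let s1 := if u == node && !(PySem.Set.contains visited' v) then (s.1 ++ [v], s.2 + 1) else s
          if v == node && !(PySem.Set.contains visited' u) then (s1.1 ++ [u], s1.2) else s1
        | _ => s) p := by
  induction connections generalizing p with
  | nil => simp [pvEntries]
  | cons row t ih =>
    have hrow := h row (List.mem_cons_self)
    match row, hrow with
    | [u, v], _ =>
      have ht : ∀ r ∈ t, r.length = 2 := fun r hr => h r (List.mem_cons_of_mem _ hr)
      simp only [pvEntries, List.flatMap_cons, List.foldl_append, List.foldl_cons]
      rw [← pvEntries]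
      rw [ih ht]
      congr 1
      by_cases hu : u == node <;> by_cases hv : v == node <;>
        by_cases cu : PySem.Set.contains visited' u <;> by_cases cv : PySem.Set.contains visited' v <;>
        simp [hu, hv]

theorem pvBfs_eq (connections : List (List Int)) (h : ∀ row ∈ connections, row.length = 2) :
    ∀ (fuel : Nat) (q : List Int) (vis : PySem.Set Int) (res : Int),
    pvBfsA (pvBuildGraph connections) fuel q vis res = pvBfsB connections fuel q vis res := by
  intro fuel
  induction fuel with
  | zero => intro q vis res; cases q <;> rfl
  | succ fuel ih =>
    intro q vis res
    cases q with
    | nil => rfl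
    | cons node rest =>
      show pvBfsA _ (fuel + 1) (node :: rest) vis res = pvBfsB _ (fuel + 1) (node :: rest) vis res
      simp only [pvBfsA, pvBfsB]
      rw [show (pvBuildGraph connections).getD node [] = PySem.Dict.getD PySem.Dict.empty node [] ++ pvEntries node connections from pvBuildGraph_getD connections h PySem.Dict.empty node]
      simp only [PySem.Dict.getD_empty, List.nil_append]
      rw [pvInner_eq connections h]
      exact ih _ _ _

-- ===== VERDICT (by name: the statement is the Claim_ definition above) =====
theorem minReorder_spec : Claim_equal_minReorder := by
  intro n connections _ hpre
  unfold Spec_minReorder minReorder minReorder_alt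
  exact pvBfs_eq connections hpre _ _ _ _
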